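-- pv_equiv track=rewrite | github.com/azadyasar/PokerRoom | game_utils.py | royal_straight_flush
-- ===== SOURCE A (Python) =====
-- def get_hand_rank(hand):
--     return ['--23456789TJQKA'.index(n) for n, h in hand]
--
-- def royal_straight_flush(hand):
--     def royal_straight(hand):
--         n = [n for n, h in hand]
--         for c in n:
--             if c not in ['A', 'K', 'Q', 'J', 'T'] or len(set(n)) != 5:
--                 return False
--         return True
--     return royal_straight(hand) and flush(hand)["result"]
--
-- def flush(hand):
--     hand_rank = get_hand_rank(hand)
--     s = [h for n, h in hand]
--     if len(set(s)) != 1: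
--         return {"result": False, "rank": -1}
--     return {"result": True, "rank": max(hand_rank)}
-- ===== SOURCE B (Python) =====
-- def royal_straight_flush(hand):
--     bits = {'T': 1, 'J': 2, 'Q': 4, 'K': 8, 'A': 16}
--     mask, suit = 0, None
--     for n, h in hand:
--         if n not in bits or (suit is not None and h != suit):
--             return False
--         mask |= bits[n]
--         suit = h
--     return mask == 31
-- ===== Notes on version B (the rewrite author's own statement) =====
-- stated objective: alternative
-- what changed: Replaces A's staged helper decomposition (royal_straight loop over names with a set-size recheck, then flush building ranks and a suit set) by one fail-fast pass over the cards that accumulates a 5-bit mask of which royal ranks were seen and threads the suit, returning mask == 31 at the end; no sets, no rank list.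
import Mathlib
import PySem

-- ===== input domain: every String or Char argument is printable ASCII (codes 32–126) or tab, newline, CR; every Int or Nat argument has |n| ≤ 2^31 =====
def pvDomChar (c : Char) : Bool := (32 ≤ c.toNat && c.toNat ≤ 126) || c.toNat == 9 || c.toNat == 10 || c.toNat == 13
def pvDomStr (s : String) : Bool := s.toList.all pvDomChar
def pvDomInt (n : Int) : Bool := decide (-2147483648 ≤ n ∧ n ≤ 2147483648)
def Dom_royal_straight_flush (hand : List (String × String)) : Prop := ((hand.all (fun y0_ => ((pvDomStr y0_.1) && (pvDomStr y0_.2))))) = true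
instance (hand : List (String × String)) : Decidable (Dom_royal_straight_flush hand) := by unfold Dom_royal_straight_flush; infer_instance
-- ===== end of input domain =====

-- B replaces A's staged helpers (royal_straight loop + flush's set/rank build) by one fail-fast pass accumulating a 5-bit rank mask and threading the suit (objective: alternative).


-- ===== PORT A =====
-- get_hand_rank: Python's '--23456789TJQKA'.index(n) raises where find returns -1; in A it is only
-- evaluated after royal_straight succeeded (every name is one of "A","K","Q","J","T"), where the two agree.
def pvGetHandRank (hand : List (String × String)) : List Int :=
  hand.map (fun p => PySem.Str.find "--23456789TJQKA" p.1)

-- the 'for c in n' loop of royal_straight, with its early returns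
def pvRSLoop (n : List String) : List String → Bool
  | [] => true
  | c :: rest =>
      if c ∉ ["A", "K", "Q", "J", "T"] ∨ PySem.Set.len (PySem.Set.ofList n) ≠ 5 then false
      else pvRSLoop n rest

def pvRoyalStraight (hand : List (String × String)) : Bool :=
  let n := hand.map (fun p => p.1)
  pvRSLoop n n

-- flush returns {"result": …, "rank": …}, ported as the pair (result, rank).
-- max(hand_rank) raises on []; the .getD (-1) branch is never taken on A's call path (flush is
-- only reached with 5 distinct names, so hand_rank ≠ []).
def pvFlush (hand : List (String × String)) : Bool × Int :=
  let hand_rank := pvGetHandRank hand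
  let s := hand.map (fun p => p.2)
  if PySem.Set.len (PySem.Set.ofList s) ≠ 1 then (false, -1)
  else (true, (PySem.List.max? hand_rank (fun x => x)).getD (-1))

def royal_straight_flush (hand : List (String × String)) : Bool :=
  pvRoyalStraight hand && (pvFlush hand).1

-- ===== PORT B =====
-- bits = {'T': 1, 'J': 2, 'Q': 4, 'K': 8, 'A': 16}
def pvBits : PySem.Dict String Nat :=
  PySem.Dict.ofList [("T", 1), ("J", 2), ("Q", 4), ("K", 8), ("A", 16)]

-- the fold of B's loop over the cards with its early return, as structural recursion on the card
-- list carrying (mask, suit); mask is a Python int that stays a small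
-- nonnegative OR of dict values, so Nat is exact; bits[n] after the membership check is `.getD 0`
-- (the default is never read: get? is some there).
def pvGo : List (String × String) → Nat → Option String → Bool
  | [], mask, _ => mask == 31
  | (n, h) :: rest, mask, suit =>
      if PySem.Dict.get? pvBits n = none ∨ (suit ≠ none ∧ suit ≠ some h) then false
      else pvGo rest (mask ||| (PySem.Dict.get? pvBits n).getD 0) (some h)

def royal_straight_flush_alt (hand : List (String × String)) : Bool :=
  pvGo hand 0 none

-- ===== PRECONDITION & SPEC =====
def Spec_royal_straight_flush (hand : List (String × String)) (out : Bool) : Prop := out = royal_straight_flush_alt hand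
instance (hand : List (String × String)) (out : Bool) : Decidable (Spec_royal_straight_flush hand out) := by unfold Spec_royal_straight_flush; infer_instance

-- ===== CLAIM (what is proved, stated in full; the proofs are below) =====
def Claim_equal_royal_straight_flush : Prop := ∀ (hand : List (String × String)), Dom_royal_straight_flush hand → Spec_royal_straight_flush hand (royal_straight_flush hand)

-- ===== LEMMAS AND PROOFS =====

-- the common characterization both programs are reduced to: nonempty hand, every name royal,
-- all suits equal, and every one of the five royal names present
def pvG (hand : List (String × String)) : Prop :=
  hand ≠ [] ∧
  (∀ c ∈ hand.map Prod.fst, c ∈ (["A", "K", "Q", "J", "T"] : List String)) ∧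
  (∀ a ∈ hand.map Prod.snd, ∀ b ∈ hand.map Prod.snd, a = b) ∧
  (∀ r ∈ (["A", "K", "Q", "J", "T"] : List String), r ∈ hand.map Prod.fst)

---- A-side lemmas ----

-- the loop of royal_straight: true iff the scanned list is empty, or every scanned name is royal
-- and the five-distinct-names condition holds
theorem pvRSLoop_eq_true_iff (n m : List String) :
    pvRSLoop n m = true ↔
      (m = [] ∨ ((∀ c ∈ m, c ∈ ["A", "K", "Q", "J", "T"]) ∧
        PySem.Set.len (PySem.Set.ofList n) = 5)) := by
  induction m with
  | nil => simp [pvRSLoop]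
  | cons c rest ih =>
      simp only [pvRSLoop]
      split_ifs with h
      · simp only [false_iff]
        rintro (hno | ⟨hall, hlen⟩)
        · simp at hno
        · rcases h with h | h
          · exact h (hall c (by simp))
          · exact h hlen
      · rw [not_or, not_not, not_not] at h
        obtain ⟨h1, h2⟩ := h
        rw [ih]
        constructor
        · rintro (rfl | ⟨hall, hlen⟩)
          · refine Or.inr ⟨?_, h2⟩
            intro x hx
            rcases List.mem_cons.mp hx with rfl | hx
            · exact h1
            · simp at hx
          · refine Or.inr ⟨?_, hlen⟩
            intro x hx
            rcases List.mem_cons.mp hx with rfl | hx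
            · exact h1
            · exact hall x hx
        · rintro (hno | ⟨hall, hlen⟩)
          · simp at hno
          · by_cases hr : rest = []
            · exact Or.inl hr
            · exact Or.inr ⟨fun x hx => hall x (List.mem_cons_of_mem _ hx), hlen⟩

theorem pvFlush_fst (hand : List (String × String)) :
    (pvFlush hand).1 = true ↔
      PySem.Set.len (PySem.Set.ofList (hand.map (fun p => p.2))) = 1 := by
  simp only [pvFlush]
  split_ifs with h
  · exact iff_of_false (by simp) h
  · exact iff_of_true rfl (not_ne_iff.mp h)

-- a nodup list of 5 names drawn from the 5 royal names contains all of them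
theorem royal_names_full (l : List String)
    (hnd : l.Nodup) (hsub : ∀ c ∈ l, c ∈ ["A", "K", "Q", "J", "T"])
    (hlen : l.length = 5) : ∀ c ∈ ["A", "K", "Q", "J", "T"], c ∈ l := by
  have hsp : List.Subperm l ["A", "K", "Q", "J", "T"] := hnd.subperm hsub
  have hperm : List.Perm l ["A", "K", "Q", "J", "T"] :=
    hsp.perm_of_length_le (by simp [hlen])
  intro c hc
  exact hperm.mem_iff.mpr hc

-- set(l) has one element iff l is nonempty with all elements equal
theorem pvSetLen_one_iff (l : List String) :
    PySem.Set.len (PySem.Set.ofList l) = 1 ↔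
      l ≠ [] ∧ ∀ a ∈ l, ∀ b ∈ l, a = b := by
  constructor
  · intro hl
    have hl' : (PySem.Set.ofList l).length = 1 := by
      have h' := hl; simp only [PySem.Set.len] at h'; exact_mod_cast h'
    obtain ⟨x, hx⟩ := List.length_eq_one_iff.mp hl'
    have hmem : ∀ a ∈ l, a = x := by
      intro a ha
      have h1 : a ∈ PySem.Set.ofList l := (PySem.Set.mem_ofList _ _).mpr ha
      rw [hx] at h1
      simpa using h1
    refine ⟨?_, fun a ha b hb => (hmem a ha).trans (hmem b hb).symm⟩
    intro he
    have hxl : x ∈ PySem.Set.ofList l := by simp [hx]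
    rw [PySem.Set.mem_ofList] at hxl
    simp [he] at hxl
  · rintro ⟨hne, hall⟩
    obtain ⟨a, t, rfl⟩ := List.exists_cons_of_ne_nil hne
    have hmem : ∀ x ∈ PySem.Set.ofList (a :: t), x = a := by
      intro x hx
      exact hall x ((PySem.Set.mem_ofList _ _).mp hx) a (by simp)
    have hain : a ∈ PySem.Set.ofList (a :: t) := (PySem.Set.mem_ofList _ _).mpr (by simp)
    have hnd := PySem.Set.nodup_ofList (α := String) (a :: t)
    rcases hS : PySem.Set.ofList (a :: t) with _ | ⟨y, ys⟩
    · rw [hS] at hain; simp at hain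
    · rw [hS] at hmem hnd
      have hy : y = a := hmem y (by simp)
      rcases ys with _ | ⟨z, zs⟩
      · simp [PySem.Set.len]
      · have hz : z = a := hmem z (by simp)
        rw [List.nodup_cons] at hnd
        exact absurd (by simp [hy, hz] : y ∈ z :: zs) hnd.1
  -- (the list l is a name list here; the lemma is stated for String)

-- under all-royal names, set(names) has 5 elements iff every royal name occurs
theorem pvSetLen_five_iff (l : List String)
    (hsub : ∀ c ∈ l, c ∈ (["A", "K", "Q", "J", "T"] : List String)) :
    PySem.Set.len (PySem.Set.ofList l) = 5 ↔
      ∀ r ∈ (["A", "K", "Q", "J", "T"] : List String), r ∈ l := by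
  have hnd := PySem.Set.nodup_ofList (α := String) l
  constructor
  · intro hl r hr
    have := royal_names_full (PySem.Set.ofList l) hnd
      (fun c hc => hsub c ((PySem.Set.mem_ofList _ _).mp hc))
      (by have h' := hl; simp only [PySem.Set.len] at h'; exact_mod_cast h') r hr
    exact (PySem.Set.mem_ofList _ _).mp this
  · intro hall
    have h1 : List.Subperm (PySem.Set.ofList l) ["A", "K", "Q", "J", "T"] :=
      hnd.subperm (fun x hx => hsub x ((PySem.Set.mem_ofList _ _).mp hx))
    have h2 : List.Subperm (["A", "K", "Q", "J", "T"] : List String) (PySem.Set.ofList l) :=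
      (by decide : (["A", "K", "Q", "J", "T"] : List String).Nodup).subperm
        (fun x hx => (PySem.Set.mem_ofList _ _).mpr (hall x hx))
    have hl1 := h1.length_le
    have hl2 := h2.length_le
    simp only [PySem.Set.len]
    simp only [List.length_cons, List.length_nil] at hl1 hl2
    omega

theorem pvA_iff (hand : List (String × String)) :
    royal_straight_flush hand = true ↔ pvG hand := by
  simp only [royal_straight_flush, Bool.and_eq_true, pvRoyalStraight]
  rw [pvRSLoop_eq_true_iff, pvFlush_fst, pvSetLen_one_iff]
  have hmapf : (hand.map (fun p => p.1)) = hand.map Prod.fst := rfl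
  have hmaps : (hand.map (fun p => p.2)) = hand.map Prod.snd := rfl
  rw [hmapf, hmaps]
  unfold pvG
  constructor
  · rintro ⟨hroyal, hne', hsuits⟩
    have hne : hand ≠ [] := fun he => hne' (by simp [he])
    rcases hroyal with hnil | ⟨hall, hlen⟩
    · exact absurd (List.map_eq_nil_iff.mp hnil) hne
    · exact ⟨hne, hall, hsuits, fun r hr => (pvSetLen_five_iff _ hall).mp hlen r hr⟩
  · rintro ⟨hne, hall, hsuits, hfull⟩
    refine ⟨Or.inr ⟨hall, (pvSetLen_five_iff _ hall).mpr hfull⟩,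
      fun he => hne (List.map_eq_nil_iff.mp he), hsuits⟩

---- B-side lemmas ----

theorem pvBits_get (n : String) :
    PySem.Dict.get? pvBits n =
      (if n = "T" then some 1 else if n = "J" then some 2 else if n = "Q" then some 4
       else if n = "K" then some 8 else if n = "A" then some 16 else none) := by
  have h : pvBits.items = [("T", 1), ("J", 2), ("Q", 4), ("K", 8), ("A", 16)] := by decide
  have hf : ∀ (s : String), ¬ n = s → (s == n) = false :=
    fun s hs => beq_eq_false_iff_ne.mpr (fun e => hs e.symm)
  simp only [PySem.Dict.get?, h, List.find?]
  split_ifs with h1 h2 h3 h4 h5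
  · subst h1; decide
  · subst h2; simp [hf _ h1]
  · subst h3; simp [hf _ h1, hf _ h2]
  · subst h4; simp [hf _ h1, hf _ h2, hf _ h3]
  · subst h5; simp [hf _ h1, hf _ h2, hf _ h3, hf _ h4]
  · simp [hf _ h1, hf _ h2, hf _ h3, hf _ h4, hf _ h5]

theorem pvBits_isSome_iff (n : String) :
    PySem.Dict.get? pvBits n ≠ none ↔ n ∈ (["A", "K", "Q", "J", "T"] : List String) := by
  rw [pvBits_get]
  split_ifs with h1 h2 h3 h4 h5
  · subst h1; decide
  · subst h2; decide
  · subst h3; decide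
  · subst h4; decide
  · subst h5; decide
  · simp [h1, h2, h3, h4, h5]

-- the five royal names in bit order
def pvName (i : Nat) : String := (["T", "J", "Q", "K", "A"] : List String).getD i ""

theorem pvRoyal_bit (n : String) (hn : PySem.Dict.get? pvBits n ≠ none) :
    ∃ i, i < 5 ∧ n = pvName i ∧ (PySem.Dict.get? pvBits n).getD 0 = 2 ^ i := by
  rw [pvBits_get] at hn ⊢
  by_cases h1 : n = "T"; · exact ⟨0, by omega, by simp [pvName, h1], by simp [h1]⟩
  by_cases h2 : n = "J"; · exact ⟨1, by omega, by simp [pvName, h2], by simp [h2]⟩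
  by_cases h3 : n = "Q"; · exact ⟨2, by omega, by simp [pvName, h3], by simp [h3]⟩
  by_cases h4 : n = "K"; · exact ⟨3, by omega, by simp [pvName, h4], by simp [h4]⟩
  by_cases h5 : n = "A"; · exact ⟨4, by omega, by simp [pvName, h5], by simp [h5]⟩
  simp [h1, h2, h3, h4, h5] at hn

def pvOrBits (cs : List (String × String)) : Nat :=
  cs.foldr (fun p acc => (PySem.Dict.get? pvBits p.1).getD 0 ||| acc) 0

theorem pvTestBit_orBits (cs : List (String × String)) (i : Nat) :
    (pvOrBits cs).testBit i =
      cs.any (fun p => ((PySem.Dict.get? pvBits p.1).getD 0).testBit i) := by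
  induction cs with
  | nil => simp [pvOrBits]
  | cons p rest ih =>
      have h : pvOrBits (p :: rest) =
          (PySem.Dict.get? pvBits p.1).getD 0 ||| pvOrBits rest := rfl
      rw [h, Nat.testBit_or, ih, List.any_cons]

theorem pvTestBit_31 (i : Nat) : (31 : Nat).testBit i = decide (i < 5) := by
  rcases i with _ | _ | _ | _ | _ | i <;> simp [Nat.testBit_succ]

theorem pvOrBits_31_iff (cs : List (String × String))
    (hroyal : ∀ p ∈ cs, PySem.Dict.get? pvBits p.1 ≠ none) :
    pvOrBits cs = 31 ↔
      ∀ r ∈ (["A", "K", "Q", "J", "T"] : List String), r ∈ cs.map Prod.fst := by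
  constructor
  · intro hm r hr
    have hidx : ∃ i, i < 5 ∧ r = pvName i := by
      simp only [List.mem_cons] at hr
      rcases hr with rfl | rfl | rfl | rfl | rfl | h
      · exact ⟨4, by omega, by decide⟩
      · exact ⟨3, by omega, by decide⟩
      · exact ⟨2, by omega, by decide⟩
      · exact ⟨1, by omega, by decide⟩
      · exact ⟨0, by omega, by decide⟩
      · simp at h
    obtain ⟨i, hi5, rfl⟩ := hidx
    have hb : (pvOrBits cs).testBit i = true := by
      rw [hm, pvTestBit_31]
      simpa using hi5
    rw [pvTestBit_orBits] at hb
    obtain ⟨p, hp, hpb⟩ := List.any_eq_true.mp hb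
    obtain ⟨j, hj5, hnj, hbj⟩ := pvRoyal_bit p.1 (hroyal p hp)
    rw [hbj, Nat.testBit_two_pow] at hpb
    have hji : j = i := by simpa using hpb
    subst hji
    exact List.mem_map.mpr ⟨p, hp, hnj⟩
  · intro hall
    apply Nat.eq_of_testBit_eq
    intro i
    rw [pvTestBit_orBits, pvTestBit_31]
    by_cases hi : i < 5
    · simp only [hi, decide_true]
      -- pvName i is one of the five royal names, hence present in the hand
      have hmem : pvName i ∈ cs.map Prod.fst := by
        apply hall
        interval_cases i <;> decide
      obtain ⟨p, hp, hfst⟩ := List.mem_map.mp hmem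
      obtain ⟨j, hj5, hnj, hbj⟩ := pvRoyal_bit p.1 (hroyal p hp)
      have hji : j = i := by
        have : pvName j = pvName i := by rw [← hnj, hfst]
        interval_cases i <;> interval_cases j <;> simp_all <;> revert this <;> decide
      refine List.any_eq_true.mpr ⟨p, hp, ?_⟩
      rw [hbj, Nat.testBit_two_pow, hji]
      simp
    · simp only [hi, decide_false]
      apply List.any_eq_false.mpr
      intro p hp
      obtain ⟨j, hj5, _, hbj⟩ := pvRoyal_bit p.1 (hroyal p hp)
      rw [hbj, Nat.testBit_two_pow]
      simp
      omega

theorem pvGo_iff (cs : List (String × String)) : ∀ (mask : Nat) (suit : Option String),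
    pvGo cs mask suit = true ↔
      ((∀ p ∈ cs, PySem.Dict.get? pvBits p.1 ≠ none) ∧
       (∀ s, suit = some s → ∀ p ∈ cs, p.2 = s) ∧
       (∀ p ∈ cs, ∀ q ∈ cs, p.2 = q.2) ∧
       mask ||| pvOrBits cs = 31) := by
  induction cs with
  | nil => intro mask suit; simp [pvGo, pvOrBits]
  | cons p rest ih =>
      obtain ⟨n, h⟩ := p
      intro mask suit
      have horb : pvOrBits ((n, h) :: rest) =
          (PySem.Dict.get? pvBits n).getD 0 ||| pvOrBits rest := rfl
      simp only [pvGo]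
      split_ifs with hc
      · simp only [false_iff]
        rintro ⟨hro, hsu, hpw, hm⟩
        rcases hc with hn | ⟨hs1, hs2⟩
        · exact hro (n, h) (by simp) hn
        · rcases suit with _ | s
          · exact hs1 rfl
          · have hh : h = s := hsu s rfl (n, h) (by simp)
            exact hs2 (by rw [hh])
      · rw [not_or] at hc
        obtain ⟨hn, hs⟩ := hc
        rw [ih]
        have hsuit : suit = none ∨ suit = some h := by
          rcases suit with _ | s
          · exact Or.inl rfl
          · right
            by_contra hne
            exact hs ⟨by simp, fun he => hne he⟩
        constructor
        · rintro ⟨hro, hsu, hpw, hm⟩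
          have hresth : ∀ p ∈ rest, p.2 = h := hsu h rfl
          refine ⟨?_, ?_, ?_, ?_⟩
          · rintro p hp
            rcases List.mem_cons.mp hp with rfl | hp
            · exact hn
            · exact hro p hp
          · rintro s hss p hp
            have hsh : s = h := by
              rcases hsuit with hns | hhs
              · rw [hns] at hss; cases hss
              · rw [hhs] at hss; injection hss with e; exact e.symm
            subst hsh
            rcases List.mem_cons.mp hp with rfl | hp
            · rfl
            · exact hresth p hp
          · rintro p hp q hq
            have hph : p.2 = h := by
              rcases List.mem_cons.mp hp with rfl | hp
              · rfl
              · exact hresth p hp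
            have hqh : q.2 = h := by
              rcases List.mem_cons.mp hq with rfl | hq
              · rfl
              · exact hresth q hq
            rw [hph, hqh]
          · rw [horb, ← Nat.or_assoc]; exact hm
        · rintro ⟨hro, hsu, hpw, hm⟩
          refine ⟨fun p hp => hro p (List.mem_cons_of_mem _ hp), ?_, ?_, ?_⟩
          · rintro s hss p hp
            injection hss with e
            subst e
            exact hpw p (List.mem_cons_of_mem _ hp) (n, h) (by simp)
          · exact fun p hp q hq =>
              hpw p (List.mem_cons_of_mem _ hp) q (List.mem_cons_of_mem _ hq)
          · rw [Nat.or_assoc, ← horb]; exact hm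

theorem pvB_iff (hand : List (String × String)) :
    royal_straight_flush_alt hand = true ↔ pvG hand := by
  unfold royal_straight_flush_alt
  rw [pvGo_iff]
  unfold pvG
  constructor
  · rintro ⟨hro, _, hpw, hm⟩
    have hroyal : ∀ c ∈ hand.map Prod.fst, c ∈ (["A", "K", "Q", "J", "T"] : List String) := by
      rintro c hc
      obtain ⟨p, hp, rfl⟩ := List.mem_map.mp hc
      exact (pvBits_isSome_iff p.1).mp (hro p hp)
    have hfull := (pvOrBits_31_iff hand hro).mp (by simpa using hm)
    refine ⟨?_, hroyal, ?_, hfull⟩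
    · intro he
      have := hfull "A" (by simp)
      rw [he] at this
      simp at this
    · rintro a ha b hb
      obtain ⟨p, hp, rfl⟩ := List.mem_map.mp ha
      obtain ⟨q, hq, rfl⟩ := List.mem_map.mp hb
      exact hpw p hp q hq
  · rintro ⟨hne, hroyal, hpw, hfull⟩
    have hro : ∀ p ∈ hand, PySem.Dict.get? pvBits p.1 ≠ none := fun p hp =>
      (pvBits_isSome_iff p.1).mpr (hroyal p.1 (List.mem_map.mpr ⟨p, hp, rfl⟩))
    refine ⟨hro, ?_, ?_, ?_⟩
    · rintro s hss; simp at hss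
    · exact fun p hp q hq =>
        hpw p.2 (List.mem_map.mpr ⟨p, hp, rfl⟩) q.2 (List.mem_map.mpr ⟨q, hq, rfl⟩)
    · simpa using (pvOrBits_31_iff hand hro).mpr hfull

theorem main_equiv (hand : List (String × String)) :
    royal_straight_flush hand = royal_straight_flush_alt hand := by
  rw [Bool.eq_iff_iff, pvA_iff, pvB_iff]

-- ===== VERDICT (by name: the statement is the Claim_ definition above) =====
theorem royal_straight_flush_spec : Claim_equal_royal_straight_flush := by
  intro hand _
  unfold Spec_royal_straight_flush
  exact main_equiv hand
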